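-- pv_equiv track=rewrite | github.com/OpenWaterFoundation/owf-app-geoprocessor-python | geoprocessor/util/string_util.py | get_leading_whitespace
-- ===== SOURCE A (Python) =====
-- def get_leading_whitespace(s: str):
--     """
--     Get the leading whitespace for a string, used to get whitespace for indented commands.
--
--     Args:
--         s (str): string to process
--     """
--     white = ""
--     for i in range(len(s)):
--         if s[i] == " " or s[i] == "\t":
--             # Add to the whitespace
--             white += s[i]
--         else:
--             # Done processing
--             break
--     return white
-- ===== SOURCE B (Python) =====
-- def get_leading_whitespace(s: str):
--     """
--     Get the leading whitespace for a string, used to get whitespace for indented commands.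
--
--     Args:
--         s (str): string to process
--     """
--     n = len(s) - len(s.lstrip(" \t"))
--     return s[:n]
-- ===== Notes on version B (the rewrite author's own statement) =====
-- stated objective: idiomatic
-- what changed: B replaces the char-by-char accumulating loop with a boundary computation (string length minus the length after stripping leading spaces/tabs) followed by a single slice.
import Mathlib
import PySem

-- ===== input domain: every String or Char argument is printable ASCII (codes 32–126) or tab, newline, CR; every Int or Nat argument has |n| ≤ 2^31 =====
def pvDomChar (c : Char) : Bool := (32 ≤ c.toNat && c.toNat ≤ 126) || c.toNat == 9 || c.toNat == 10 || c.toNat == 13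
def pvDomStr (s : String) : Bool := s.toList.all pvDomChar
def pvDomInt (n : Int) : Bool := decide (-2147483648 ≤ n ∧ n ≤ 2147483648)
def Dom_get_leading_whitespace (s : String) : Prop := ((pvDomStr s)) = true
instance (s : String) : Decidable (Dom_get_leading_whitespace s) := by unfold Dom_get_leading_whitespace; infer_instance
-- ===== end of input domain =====

-- B replaces A's char-by-char accumulating loop with a boundary computation
-- (len(s) - len(s.lstrip(' \t'))) followed by a single slice (idiomatic; same result).

-- ===== PORT A =====
-- A's 'for i in range(len(s))' walks the characters in order and breaks at the
-- first non-space/tab; ported as structural recursion over s.toList carrying the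
-- accumulator `white`, with the break as the non-recursive branch.
def pvLeadLoopA : List Char → List Char → List Char
  | white, [] => white
  | white, c :: rest =>
      if c == ' ' || c == '\t' then pvLeadLoopA (white ++ [c]) rest else white

def get_leading_whitespace (s : String) : String :=
  String.ofList (pvLeadLoopA [] s.toList)

-- ===== PORT B =====
-- Python's s.lstrip(" \t") drops the maximal run of leading chars from the set
-- {' ', '\t'}; ported by hand (exact) as dropWhile on the char list.
def pvLstripSpaceTab (cs : List Char) : List Char :=
  cs.dropWhile (fun c => c == ' ' || c == '\t')

def get_leading_whitespace_alt (s : String) : String :=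
  let n : Int := (s.toList.length : Int) - ((pvLstripSpaceTab s.toList).length : Int)
  PySem.Str.slice s none (some n)

-- ===== PRECONDITION & SPEC =====
def Spec_get_leading_whitespace (s : String) (out : String) : Prop := out = get_leading_whitespace_alt s
instance (s : String) (out : String) : Decidable (Spec_get_leading_whitespace s out) := by unfold Spec_get_leading_whitespace; infer_instance

-- ===== CLAIM (what is proved, stated in full; the proofs are below) =====
def Claim_equal_get_leading_whitespace : Prop := ∀ (s : String), Dom_get_leading_whitespace s → Spec_get_leading_whitespace s (get_leading_whitespace s)

-- ===== LEMMAS AND PROOFS =====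

-- A's loop appends exactly the maximal leading run of spaces/tabs.
theorem pvLeadLoopA_eq_takeWhile (cs : List Char) :
    ∀ white, pvLeadLoopA white cs = white ++ cs.takeWhile (fun c => c == ' ' || c == '\t') := by
  induction cs with
  | nil => intro white; simp [pvLeadLoopA]
  | cons c rest ih =>
      intro white
      by_cases h : (c == ' ' || c == '\t') = true
      · simp [pvLeadLoopA, h, ih]
      · simp [pvLeadLoopA, h]

-- ===== VERDICT (by name: the statement is the Claim_ definition above) =====
theorem get_leading_whitespace_spec : Claim_equal_get_leading_whitespace := by
  intro s _
  show get_leading_whitespace s = get_leading_whitespace_alt s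
  apply String.toList_inj.mp
  unfold get_leading_whitespace get_leading_whitespace_alt pvLstripSpaceTab
  rw [pvLeadLoopA_eq_takeWhile]
  set p : Char → Bool := fun c => c == ' ' || c == '\t' with hp
  have hlen : (s.toList.dropWhile p).length ≤ s.toList.length :=
    List.length_dropWhile_le p s.toList
  have hn : ((s.toList.length : Int) - ((s.toList.dropWhile p).length : Int)).toNat
      = (s.toList.takeWhile p).length := by
    have := List.takeWhile_append_dropWhile (p := p) (l := s.toList)
    have hlen2 : (s.toList.takeWhile p).length + (s.toList.dropWhile p).length
        = s.toList.length := by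
      rw [← List.length_append, this]
    omega
  simp only [PySem.Str.toList_slice, PySem.Chars.slice_eq_listSlice]
  have h0 : (0:Int) ≤ (s.toList.length : Int) - ((s.toList.dropWhile p).length : Int) := by omega
  rw [PySem.List.slice_to s.toList h0, hn]
  have key : List.take (s.toList.takeWhile p).length s.toList = s.toList.takeWhile p := by
    calc List.take (s.toList.takeWhile p).length s.toList
        = List.take (s.toList.takeWhile p).length (s.toList.takeWhile p ++ s.toList.dropWhile p) := by
          rw [List.takeWhile_append_dropWhile]
      _ = s.toList.takeWhile p := List.take_left
  rw [key]
  simp
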